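-- pv_equiv track=rewrite | github.com/kwonssshyeon/2023_haedal_Algorithm | 권수현/겨울방학/0130/[9079]동전 게임/[9079]동전 게임-2.py | solution
-- ===== SOURCE A (Python) =====
-- from itertools import combinations
--
-- change = [[0,1,2],[3,4,5],[6,7,8],[0,3,6],[1,4,7],[2,5,8],[0,4,8],[2,4,6]]
--
-- def solution(coins):
--     for cnt in range(5):
--         for values in combinations(change,cnt):
--             copy = coins
--             for value in values:
--                 for idx in value:
--                     copy^=1<<idx
--
--             if copy==0 or copy==511:
--                 return cnt
--     return -1
-- ===== SOURCE B (Python) =====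
-- # Precomputed table: for every subset of the eight flip lines (grouped by subset size),
-- # the XOR mask it applies; solution is then a single early-return scan over the table.
-- MASKS = [7, 56, 448, 73, 146, 292, 273, 84]  # bitmask of each of the 8 lines (rows, cols, diagonals)
--
--
-- def _popcount8(s):
--     c = 0
--     for i in range(8):
--         c += (s >> i) & 1
--     return c
--
--
-- def _mask_of(s):
--     m = 0
--     for i in range(8):
--         if (s >> i) & 1:
--             m ^= MASKS[i]
--     return m
--
--
-- _TABLE = []
-- for _k in range(9):
--     for _s in range(256):
--         if _popcount8(_s) == _k:
--             _TABLE.append((_mask_of(_s), _k))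
--
--
-- def solution(coins):
--     for m, pc in _TABLE:
--         if pc <= 4 and (coins ^ m == 0 or coins ^ m == 511):
--             return pc
--     return -1
-- ===== Notes on version B (the rewrite author's own statement) =====
-- stated objective: alternative
-- what changed: A searches itertools.combinations of the flip lines by increasing size, re-flipping the board cell by cell for every combination on every call; B precomputes once, at module level, the XOR bitmask of every line-subset grouped by subset size, and solution is a single early-return scan over that table.
import Mathlib
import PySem

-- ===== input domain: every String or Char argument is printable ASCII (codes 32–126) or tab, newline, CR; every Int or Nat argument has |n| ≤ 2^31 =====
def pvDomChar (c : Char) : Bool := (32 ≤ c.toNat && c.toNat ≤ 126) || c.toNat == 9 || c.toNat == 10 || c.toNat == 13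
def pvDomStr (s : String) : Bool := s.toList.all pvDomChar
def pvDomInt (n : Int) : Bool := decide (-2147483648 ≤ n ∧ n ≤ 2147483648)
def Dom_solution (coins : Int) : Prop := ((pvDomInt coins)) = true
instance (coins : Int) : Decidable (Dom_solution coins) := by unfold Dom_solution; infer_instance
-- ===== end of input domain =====

-- B replaces A's increasing-size itertools.combinations search (re-flipping the board cell by
-- cell for each combination) with one early-return scan over a precomputed table of the
-- line-subset XOR masks grouped by subset size (objective: alternative decomposition).

-- ===== PORT A =====
-- the 8 flip lines (index lists), as in A
def pvChange : List (List Nat) := [[0,1,2],[3,4,5],[6,7,8],[0,3,6],[1,4,7],[2,5,8],[0,4,8],[2,4,6]]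

-- itertools.combinations(l, k), in itertools order
def pvCombos {α : Type} : Nat → List α → List (List α)
  | 0, _ => [[]]
  | _+1, [] => []
  | k+1, x :: xs => (pvCombos k xs).map (fun t => x :: t) ++ pvCombos (k+1) xs

-- A's nested 'for value in values: for idx in value: copy ^= 1<<idx' loops
-- (idx is a literal in 0..8, so Python's 1<<idx is exactly ((1 <<< idx : Nat) : Int))
def pvApply (coins : Int) (values : List (List Nat)) : Int :=
  values.foldl
    (fun c value => value.foldl (fun c idx => PySem.Int.bxor c ((1 <<< idx : Nat) : Int)) c) coins

def solution (coins : Int) : Int :=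
  match (List.range 5).find? (fun cnt =>
      (pvCombos cnt pvChange).any (fun values =>
        let copy := pvApply coins values
        copy == 0 || copy == 511)) with
  | some cnt => (cnt : Int)
  | none => -1

-- ===== PORT B =====
def pvMasks : List Int := [7, 56, 448, 73, 146, 292, 273, 84]

-- Source B's _popcount8 ('for i in range(8): c += (s >> i) & 1')
def pvPopcount8 (s : Int) : Int :=
  (List.range 8).foldl (fun c (i : Nat) => c + PySem.Int.band (s >>> i) 1) 0

-- Source B's _mask_of ('for i in range(8): if (s >> i) & 1: m ^= MASKS[i]')
def pvMaskOf (s : Int) : Int :=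
  (List.range 8).foldl
    (fun m (i : Nat) =>
      if PySem.Int.band (s >>> i) 1 ≠ 0 then PySem.Int.bxor m (pvMasks.getD i 0) else m) 0

-- Source B's module-level _TABLE loop: for k in range(9): for s in range(256): if pc(s)==k: append
def pvTable : List (Int × Int) :=
  (List.range 9).flatMap (fun k =>
    ((PySem.List.pyRange 0 256 1).filter (fun s => pvPopcount8 s == (k : Int))).map
      (fun s => (pvMaskOf s, (k : Int))))

-- Source B's solution: early-return scan over _TABLE
def solution_alt (coins : Int) : Int :=
  match pvTable.find? (fun mp =>
      decide (mp.2 ≤ 4) && (PySem.Int.bxor coins mp.1 == 0 || PySem.Int.bxor coins mp.1 == 511)) with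
  | some mp => mp.2
  | none => -1

-- ===== PRECONDITION & SPEC =====
def Spec_solution (coins : Int) (out : Int) : Prop := out = solution_alt coins
instance (coins : Int) (out : Int) : Decidable (Spec_solution coins out) := by unfold Spec_solution; infer_instance

-- ===== CLAIM (what is proved, stated in full; the proofs are below) =====
def Claim_equal_solution : Prop := ∀ (coins : Int), Dom_solution coins → Spec_solution coins (solution coins)

-- ===== LEMMAS AND PROOFS =====
def pvLvl0 : List Nat := [0]
def pvLvl1 : List Nat := [7, 56, 448, 73, 146, 292, 273, 84]
def pvLvl2 : List Nat := [63, 455, 78, 149, 291, 278, 83, 504, 113, 170, 284, 297, 108, 393, 338, 228, 209, 404, 219, 365, 344, 29, 438, 387, 198, 53, 368, 325]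
def pvLvl3 : List Nat := [511, 118, 173, 283, 302, 107, 398, 341, 227, 214, 403, 220, 362, 351, 26, 433, 388, 193, 50, 375, 322, 433, 362, 220, 233, 428, 227, 341, 352, 37, 398, 443, 254, 13, 328, 381, 283, 173, 152, 477, 118, 67, 262, 501, 176, 133, 511, 458, 143, 124, 313, 268, 167, 482, 471, 97]
def pvLvl4 : List Nat := [438, 365, 219, 238, 427, 228, 338, 359, 34, 393, 444, 249, 10, 335, 378, 284, 170, 159, 474, 113, 68, 257, 498, 183, 130, 504, 461, 136, 123, 318, 267, 160, 485, 464, 102, 291, 149, 160, 485, 78, 123, 318, 461, 136, 189, 455, 498, 183, 68, 257, 308, 159, 474, 495, 89, 63, 10, 335, 444, 249, 204, 359, 34, 23, 417, 238, 427, 414, 40, 243]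
def pvTableLit : List (Int × Int) := [(0, 0), (7, 1), (56, 1), (448, 1), (73, 1), (146, 1), (292, 1), (273, 1), (84, 1), (63, 2), (455, 2), (504, 2), (78, 2), (113, 2), (393, 2), (149, 2), (170, 2), (338, 2), (219, 2), (291, 2), (284, 2), (228, 2), (365, 2), (438, 2), (278, 2), (297, 2), (209, 2), (344, 2), (387, 2), (53, 2), (83, 2), (108, 2), (404, 2), (29, 2), (198, 2), (368, 2), (325, 2), (511, 3), (118, 3), (398, 3), (433, 3), (173, 3), (341, 3), (362, 3), (220, 3), (227, 3), (283, 3), (283, 3), (227, 3), (220, 3), (362, 3), (341, 3), (173, 3), (433, 3), (398, 3), (118, 3), (511, 3), (302, 3), (214, 3), (233, 3), (351, 3), (352, 3), (152, 3), (388, 3), (443, 3), (67, 3), (458, 3), (50, 3), (13, 3), (501, 3), (124, 3), (167, 3), (107, 3), (403, 3), (428, 3), (26, 3), (37, 3), (477, 3), (193, 3), (254, 3), (262, 3), (143, 3), (375, 3), (328, 3), (176, 3), (313, 3), (482, 3), (322, 3), (381, 3), (133, 3), (268, 3), (471, 3), (97, 3), (438, 4), (365, 4), (228, 4), (284, 4),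 (291, 4), (219, 4), (338, 4), (170, 4), (149, 4), (393, 4), (113, 4), (78, 4), (504, 4), (455, 4), (63, 4), (238, 4), (359, 4), (159, 4), (160, 4), (444, 4), (68, 4), (123, 4), (461, 4), (498, 4), (10, 4), (10, 4), (498, 4), (461, 4), (123, 4), (68, 4), (444, 4), (160, 4), (159, 4), (359, 4), (238, 4), (427, 4), (34, 4), (474, 4), (485, 4), (249, 4), (257, 4), (318, 4), (136, 4), (183, 4), (335, 4), (335, 4), (183, 4), (136, 4), (318, 4), (257, 4), (249, 4), (485, 4), (474, 4), (34, 4), (427, 4), (378, 4), (130, 4), (189, 4), (267, 4), (308, 4), (204, 4), (464, 4), (495, 4), (23, 4), (414, 4), (102, 4), (89, 4), (417, 4), (40, 4), (243, 4), (292, 5), (146, 5), (73, 5), (448, 5), (56, 5), (7, 5), (167, 5), (124, 5), (501, 5), (13, 5), (50, 5), (458, 5), (67, 5), (443, 5), (388, 5), (152, 5), (352, 5), (351, 5), (233, 5), (214, 5), (302, 5), (482, 5), (313, 5), (176, 5), (328, 5), (375, 5), (143, 5), (262, 5), (254, 5), (193, 5), (477, 5), (37, 5), (26, 5), (428, 5),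 (403, 5), (107, 5), (186, 5), (307, 5), (203, 5), (244, 5), (488, 5), (16, 5), (47, 5), (409, 5), (422, 5), (94, 5), (94, 5), (422, 5), (409, 5), (47, 5), (16, 5), (488, 5), (244, 5), (203, 5), (307, 5), (186, 5), (0, 6), (53, 6), (387, 6), (344, 6), (209, 6), (297, 6), (278, 6), (368, 6), (198, 6), (29, 6), (404, 6), (108, 6), (83, 6), (243, 6), (40, 6), (417, 6), (89, 6), (102, 6), (414, 6), (23, 6), (495, 6), (464, 6), (204, 6), (308, 6), (267, 6), (189, 6), (130, 6), (378, 6), (273, 7), (84, 7), (97, 7), (471, 7), (268, 7), (133, 7), (381, 7), (322, 7), (325, 8)]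
def pvG0 : List (Int × Int) := [(0, 0)]
def pvG1 : List (Int × Int) := [(7, 1), (56, 1), (448, 1), (73, 1), (146, 1), (292, 1), (273, 1), (84, 1)]
def pvG2 : List (Int × Int) := [(63, 2), (455, 2), (504, 2), (78, 2), (113, 2), (393, 2), (149, 2), (170, 2), (338, 2), (219, 2), (291, 2), (284, 2), (228, 2), (365, 2), (438, 2), (278, 2), (297, 2), (209, 2), (344, 2), (387, 2), (53, 2), (83, 2), (108, 2), (404, 2), (29, 2), (198, 2), (368, 2), (325, 2)]
def pvG3 : List (Int × Int) := [(511, 3), (118, 3), (398, 3), (433, 3), (173, 3), (341, 3), (362, 3), (220, 3), (227, 3), (283, 3), (283, 3), (227, 3), (220, 3), (362, 3), (341, 3), (173, 3), (433, 3), (398, 3), (118, 3), (511, 3), (302, 3), (214, 3), (233, 3), (351, 3), (352, 3), (152, 3), (388, 3), (443, 3), (67, 3), (458, 3), (50, 3), (13, 3), (501, 3), (124, 3), (167, 3), (107, 3), (403, 3), (428, 3), (26, 3), (37, 3), (477, 3), (193, 3), (254, 3), (262, 3), (143, 3), (375, 3), (328, 3), (176, 3), (313, 3), (482, 3), (322,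 3), (381, 3), (133, 3), (268, 3), (471, 3), (97, 3)]
def pvG4 : List (Int × Int) := [(438, 4), (365, 4), (228, 4), (284, 4), (291, 4), (219, 4), (338, 4), (170, 4), (149, 4), (393, 4), (113, 4), (78, 4), (504, 4), (455, 4), (63, 4), (238, 4), (359, 4), (159, 4), (160, 4), (444, 4), (68, 4), (123, 4), (461, 4), (498, 4), (10, 4), (10, 4), (498, 4), (461, 4), (123, 4), (68, 4), (444, 4), (160, 4), (159, 4), (359, 4), (238, 4), (427, 4), (34, 4), (474, 4), (485, 4), (249, 4), (257, 4), (318, 4), (136, 4), (183, 4), (335, 4), (335, 4), (183, 4), (136, 4), (318, 4), (257, 4), (249, 4), (485, 4), (474, 4), (34, 4), (427, 4), (378, 4), (130, 4), (189, 4), (267, 4), (308, 4), (204, 4), (464, 4), (495, 4), (23, 4), (414, 4), (102, 4), (89, 4), (417, 4), (40, 4), (243, 4)]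
def pvG5 : List (Int × Int) := [(292, 5), (146, 5), (73, 5), (448, 5), (56, 5), (7, 5), (167, 5), (124, 5), (501, 5), (13, 5), (50, 5), (458, 5), (67, 5), (443, 5), (388, 5), (152, 5), (352, 5), (351, 5), (233, 5), (214, 5), (302, 5), (482, 5), (313, 5), (176, 5), (328, 5), (375, 5), (143, 5), (262, 5), (254, 5), (193, 5), (477, 5), (37, 5), (26, 5), (428, 5), (403, 5), (107, 5), (186, 5), (307, 5), (203, 5), (244, 5), (488, 5), (16, 5), (47, 5), (409, 5), (422, 5), (94, 5), (94, 5), (422, 5), (409, 5), (47, 5), (16, 5), (488, 5), (244, 5), (203, 5), (307, 5), (186, 5)]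
def pvG6 : List (Int × Int) := [(0, 6), (53, 6), (387, 6), (344, 6), (209, 6), (297, 6), (278, 6), (368, 6), (198, 6), (29, 6), (404, 6), (108, 6), (83, 6), (243, 6), (40, 6), (417, 6), (89, 6), (102, 6), (414, 6), (23, 6), (495, 6), (464, 6), (204, 6), (308, 6), (267, 6), (189, 6), (130, 6), (378, 6)]
def pvG7 : List (Int × Int) := [(273, 7), (84, 7), (97, 7), (471, 7), (268, 7), (133, 7), (381, 7), (322, 7)]
def pvG8 : List (Int × Int) := [(325, 8)]
def pvG0N : List Nat := [0]
def pvG1N : List Nat := [7, 56, 448, 73, 146, 292, 273, 84]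
def pvG2N : List Nat := [63, 455, 504, 78, 113, 393, 149, 170, 338, 219, 291, 284, 228, 365, 438, 278, 297, 209, 344, 387, 53, 83, 108, 404, 29, 198, 368, 325]
def pvG3N : List Nat := [511, 118, 398, 433, 173, 341, 362, 220, 227, 283, 283, 227, 220, 362, 341, 173, 433, 398, 118, 511, 302, 214, 233, 351, 352, 152, 388, 443, 67, 458, 50, 13, 501, 124, 167, 107, 403, 428, 26, 37, 477, 193, 254, 262, 143, 375, 328, 176, 313, 482, 322, 381, 133, 268, 471, 97]
def pvG4N : List Nat := [438, 365, 228, 284, 291, 219, 338, 170, 149, 393, 113, 78, 504, 455, 63, 238, 359, 159, 160, 444, 68, 123, 461, 498, 10, 10, 498, 461, 123, 68, 444, 160, 159, 359, 238, 427, 34, 474, 485, 249, 257, 318, 136, 183, 335, 335, 183, 136, 318, 257, 249, 485, 474, 34, 427, 378, 130, 189, 267, 308, 204, 464, 495, 23, 414, 102, 89, 417, 40, 243]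

def pvLvl (k : Nat) : List Nat :=
  match k with
  | 0 => pvLvl0 | 1 => pvLvl1 | 2 => pvLvl2 | 3 => pvLvl3 | _ => pvLvl4

def pvG (k : Nat) : List (Int × Int) :=
  match k with
  | 0 => pvG0 | 1 => pvG1 | 2 => pvG2 | 3 => pvG3 | 4 => pvG4
  | 5 => pvG5 | 6 => pvG6 | 7 => pvG7 | _ => pvG8

def pvGN (k : Nat) : List Nat :=
  match k with
  | 0 => pvG0N | 1 => pvG1N | 2 => pvG2N | 3 => pvG3N | _ => pvG4N

-- the hit test of the shared 5-level characterization
def pvHit (n : Nat) (k : Nat) : Bool := (pvLvl k).any (fun M => M == n || (511 ^^^ M) == n)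

-- shared characterization both ports are reduced to
def pvChk (n : Nat) : Int :=
  match (List.range 5).find? (fun k => pvHit n k) with
  | some k => (k : Int)
  | none => -1

-- B's scan predicate, named for the proofs (definitionally the lambda in solution_alt)
def pvCond (coins : Int) (mp : Int × Int) : Bool :=
  decide (mp.2 ≤ 4) && (PySem.Int.bxor coins mp.1 == 0 || PySem.Int.bxor coins mp.1 == 511)

-- ---- generic list helpers ----
theorem pv_any_congr_mem {α : Type} (p q : α → Bool) :
    ∀ (l : List α), (∀ x ∈ l, p x = q x) → l.any p = l.any q := by
  intro l
  induction l with
  | nil => intro _; rfl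
  | cons x xs ih =>
    intro h
    simp only [List.any_cons, h x (by simp)]
    rw [ih (fun a ha => h a (by simp [ha]))]

theorem pv_find?_congr_mem {α : Type} (p q : α → Bool) :
    ∀ (l : List α), (∀ x ∈ l, p x = q x) → l.find? p = l.find? q := by
  intro l
  induction l with
  | nil => intro _; rfl
  | cons x xs ih =>
    intro h
    rw [List.find?_cons, List.find?_cons, h x (by simp)]
    split
    · rfl
    · exact ih (fun a ha => h a (by simp [ha]))

theorem pv_foldl_inv {α β : Type} (P : β → Prop) (f : β → α → β) :
    ∀ (l : List α) (b : β), P b → (∀ b a, P b → a ∈ l → P (f b a)) → P (l.foldl f b) := by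
  intro l
  induction l with
  | nil => intro b hb _; simpa using hb
  | cons x xs ih =>
    intro b hb hf
    simp only [List.foldl_cons]
    exact ih _ (hf b x hb (by simp)) (fun b a hb ha => hf b a hb (by simp [ha]))

theorem pv_bool_eq_of_iff {a b : Bool} (h : a = true ↔ b = true) : a = b := by
  cases a <;> cases b <;> simp_all

-- ---- Nat xor algebra ----
theorem pv_xor511 (n m : Nat) : n ^^^ m = 511 ↔ 511 ^^^ m = n := by
  constructor
  · intro h
    rw [← h, Nat.xor_xor_cancel_right]
  · intro h
    rw [← h, Nat.xor_xor_cancel_right]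

theorem pv_condNat (n m : Nat) :
    ((((n ^^^ m : Nat) : Int) == 0) || (((n ^^^ m : Nat) : Int) == 511))
      = ((m == n) || ((511 ^^^ m) == n)) := by
  apply pv_bool_eq_of_iff
  simp only [Bool.or_eq_true, beq_iff_eq, Int.natCast_eq_zero,
    show ((511 : Int) = ((511 : Nat) : Int)) from rfl, Nat.cast_inj]
  rw [Nat.xor_eq_zero, pv_xor511]
  constructor
  · rintro (h | h)
    · exact Or.inl h.symm
    · exact Or.inr h
  · rintro (h | h)
    · exact Or.inl h.symm
    · exact Or.inr h

-- ---- A-side: reduce solution (↑n) to pvChk n ----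
def pvNatInner (c : Nat) (v : List Nat) : Nat := v.foldl (fun c idx => c ^^^ (1 <<< idx)) c

def pvNatApply (n : Nat) (vs : List (List Nat)) : Nat := vs.foldl pvNatInner n

theorem pv_inner_cast (v : List Nat) :
    ∀ c : Nat,
      v.foldl (fun c idx => PySem.Int.bxor c ((1 <<< idx : Nat) : Int)) ((c : Nat) : Int)
        = ((pvNatInner c v : Nat) : Int) := by
  induction v with
  | nil => intro c; rfl
  | cons x xs ih =>
    intro c
    simp only [List.foldl_cons, pvNatInner, PySem.Int.bxor_natCast]
    exact ih (c ^^^ (1 <<< x))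

theorem pv_apply_cast (vs : List (List Nat)) :
    ∀ n : Nat, pvApply ((n : Nat) : Int) vs = ((pvNatApply n vs : Nat) : Int) := by
  induction vs with
  | nil => intro n; rfl
  | cons v vs ih =>
    intro n
    simp only [pvApply, pvNatApply, List.foldl_cons] at *
    rw [pv_inner_cast v n]
    exact ih (pvNatInner n v)

theorem pv_inner_shift (v : List Nat) : ∀ a b : Nat, pvNatInner (a ^^^ b) v = a ^^^ pvNatInner b v := by
  induction v with
  | nil => intro a b; rfl
  | cons x xs ih =>
    intro a b
    simp only [pvNatInner, List.foldl_cons] at *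
    rw [Nat.xor_assoc a b (1 <<< x)]
    exact ih a (b ^^^ (1 <<< x))

theorem pv_apply_shift (vs : List (List Nat)) :
    ∀ a b : Nat, pvNatApply (a ^^^ b) vs = a ^^^ pvNatApply b vs := by
  induction vs with
  | nil => intro a b; rfl
  | cons v vs ih =>
    intro a b
    simp only [pvNatApply, List.foldl_cons] at *
    rw [pv_inner_shift v a b]
    exact ih a (pvNatInner b v)

theorem pv_apply_mask (n : Nat) (vs : List (List Nat)) :
    pvNatApply n vs = n ^^^ pvNatApply 0 vs := by
  have h : n = n ^^^ 0 := by simp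
  rw [h, pv_apply_shift vs n 0]
  simp

theorem pv_lvl_eq : ∀ k ∈ List.range 5, (pvCombos k pvChange).map (pvNatApply 0) = pvLvl k := by
  intro k hk
  have hk5 : k < 5 := List.mem_range.mp hk
  interval_cases k <;> decide

theorem pv_A_bridge (n : Nat) : solution ((n : Nat) : Int) = pvChk n := by
  unfold solution pvChk
  have h : ∀ k ∈ List.range 5,
      ((pvCombos k pvChange).any (fun values =>
        let copy := pvApply ((n : Nat) : Int) values
        copy == 0 || copy == 511)) = pvHit n k := by
    intro k hk
    have h1 : ∀ vs : List (List Nat),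
        ((pvApply ((n : Nat) : Int) vs == 0) || (pvApply ((n : Nat) : Int) vs == 511))
          = ((pvNatApply 0 vs == n) || ((511 ^^^ pvNatApply 0 vs) == n)) := by
      intro vs
      rw [pv_apply_cast vs n, pv_apply_mask n vs]
      exact pv_condNat n (pvNatApply 0 vs)
    calc (pvCombos k pvChange).any (fun vs =>
            let copy := pvApply ((n : Nat) : Int) vs
            copy == 0 || copy == 511)
        = (pvCombos k pvChange).any (fun vs =>
            (pvNatApply 0 vs == n) || ((511 ^^^ pvNatApply 0 vs) == n)) := by
          exact pv_any_congr_mem _ _ _ (fun vs _ => h1 vs)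
      _ = ((pvCombos k pvChange).map (pvNatApply 0)).any (fun M => (M == n) || ((511 ^^^ M) == n)) := by
          rw [List.any_map]
          rfl
      _ = pvHit n k := by rw [pv_lvl_eq k hk]; rfl
  rw [pv_find?_congr_mem _ _ _ h]

-- ---- B-side: reduce solution_alt (↑n) to pvChk n ----
set_option maxRecDepth 40000 in
theorem pv_table_lit : pvTable = pvTableLit := by decide

set_option maxRecDepth 40000 in
theorem pv_split :
    pvTableLit = pvG0 ++ (pvG1 ++ (pvG2 ++ (pvG3 ++ (pvG4 ++ (pvG5 ++ (pvG6 ++ (pvG7 ++ pvG8))))))) := by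
  decide

theorem pv_solution_alt_eq (coins : Int) :
    solution_alt coins =
      match pvTable.find? (pvCond coins) with
      | some mp => mp.2
      | none => -1 := rfl

theorem pv_G_facts : ∀ k ∈ List.range 5, ∀ mp ∈ pvG k, mp.2 = (k : Int) ∧ 0 ≤ mp.1 := by decide

theorem pv_GN_eq : ∀ k ∈ List.range 5, (pvG k).map (fun mp => mp.1.toNat) = pvGN k := by decide

theorem pv_perm0 : (pvGN 0).Perm (pvLvl 0) := by decide
theorem pv_perm1 : (pvGN 1).Perm (pvLvl 1) := by decide
theorem pv_perm2 : (pvGN 2).Perm (pvLvl 2) := by decide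
theorem pv_perm3 : (pvGN 3).Perm (pvLvl 3) := by decide
theorem pv_perm4 : (pvGN 4).Perm (pvLvl 4) := by decide

theorem pv_perm : ∀ k ∈ List.range 5, (pvGN k).Perm (pvLvl k) := by
  intro k hk
  have hk5 : k < 5 := List.mem_range.mp hk
  interval_cases k
  · exact pv_perm0
  · exact pv_perm1
  · exact pv_perm2
  · exact pv_perm3
  · exact pv_perm4

theorem pv_condG (n : Nat) (k : Nat) (hk : k ∈ List.range 5) :
    ∀ mp ∈ pvG k, pvCond ((n : Nat) : Int) mp
      = ((mp.1.toNat == n) || ((511 ^^^ mp.1.toNat) == n)) := by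
  intro mp hmp
  obtain ⟨h2, h1⟩ := pv_G_facts k hk mp hmp
  have hk4 : k ≤ 4 := by have := List.mem_range.mp hk; omega
  unfold pvCond
  rw [h2]
  rw [show (decide ((k : Int) ≤ 4)) = true by simp; exact_mod_cast hk4, Bool.true_and]
  rw [show mp.1 = ((mp.1.toNat : Nat) : Int) from (Int.toNat_of_nonneg h1).symm]
  rw [PySem.Int.bxor_natCast]
  exact pv_condNat n mp.1.toNat

-- hit transfer: the group's scan test fires iff pvHit does
theorem pv_G_any (n : Nat) (k : Nat) (hk : k ∈ List.range 5) :
    (pvG k).any (pvCond ((n : Nat) : Int)) = pvHit n k := by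
  rw [pv_any_congr_mem _ _ _ (pv_condG n k hk)]
  rw [show (fun mp : Int × Int => (mp.1.toNat == n) || ((511 ^^^ mp.1.toNat) == n))
        = ((fun M : Nat => (M == n) || ((511 ^^^ M) == n)) ∘ (fun mp : Int × Int => mp.1.toNat))
      from rfl]
  rw [← List.any_map]
  rw [pv_GN_eq k hk]
  exact (pv_perm k hk).any_eq

theorem pv_G_none (n : Nat) (k : Nat) (hk : k ∈ List.range 5) (h : pvHit n k = false) :
    (pvG k).find? (pvCond ((n : Nat) : Int)) = none := by
  rw [List.find?_eq_none]
  have := pv_G_any n k hk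
  rw [h] at this
  exact List.any_eq_false.mp this

theorem pv_G_some (n : Nat) (k : Nat) (hk : k ∈ List.range 5) (h : pvHit n k = true) :
    ∃ mp, (pvG k).find? (pvCond ((n : Nat) : Int)) = some mp ∧ mp.2 = (k : Int) := by
  have hany : (pvG k).any (pvCond ((n : Nat) : Int)) = true := by rw [pv_G_any n k hk]; exact h
  rw [List.any_eq_true] at hany
  obtain ⟨mp0, hmem0, hc0⟩ := hany
  have hsome : ((pvG k).find? (pvCond ((n : Nat) : Int))).isSome = true :=
    List.find?_isSome.mpr ⟨mp0, hmem0, hc0⟩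
  obtain ⟨mp, hmp⟩ := Option.isSome_iff_exists.mp hsome
  exact ⟨mp, hmp, (pv_G_facts k hk mp (List.mem_of_find?_eq_some hmp)).1⟩

theorem pv_G_rest (coins : Int) : ∀ k, 5 ≤ k → k ≤ 8 → (pvG k).find? (pvCond coins) = none := by
  intro k h5 h8
  have hall : ∀ mp ∈ pvG k, ¬ (mp.2 ≤ 4) := by interval_cases k <;> decide
  rw [List.find?_eq_none]
  intro mp hmp
  unfold pvCond
  simp [hall mp hmp]

theorem pv_B_bridge (n : Nat) : solution_alt ((n : Nat) : Int) = pvChk n := by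
  rw [pv_solution_alt_eq, pv_table_lit, pv_split]
  simp only [List.find?_append]
  rw [show pvG5 = pvG 5 from rfl, show pvG6 = pvG 6 from rfl, show pvG7 = pvG 7 from rfl,
    show pvG8 = pvG 8 from rfl]
  rw [pv_G_rest _ 5 (by norm_num) (by norm_num), pv_G_rest _ 6 (by norm_num) (by norm_num),
    pv_G_rest _ 7 (by norm_num) (by norm_num), pv_G_rest _ 8 (by norm_num) (by norm_num)]
  have hr5 : List.range 5 = [0, 1, 2, 3, 4] := rfl
  by_cases h0 : pvHit n 0 = true
  · obtain ⟨mp, hmp, hv⟩ := pv_G_some n 0 (by decide) h0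
    rw [show pvG0 = pvG 0 from rfl, hmp]
    simp only [Option.some_or, Option.none_or]
    rw [hv]
    simp [pvChk, hr5, h0]
  · have h0' : pvHit n 0 = false := by simpa using h0
    rw [show pvG0 = pvG 0 from rfl, pv_G_none n 0 (by decide) h0']
    by_cases h1 : pvHit n 1 = true
    · obtain ⟨mp, hmp, hv⟩ := pv_G_some n 1 (by decide) h1
      rw [show pvG1 = pvG 1 from rfl, hmp]
      simp only [Option.some_or, Option.none_or]
      rw [hv]
      simp [pvChk, hr5, h0', h1]
    · have h1' : pvHit n 1 = false := by simpa using h1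
      rw [show pvG1 = pvG 1 from rfl, pv_G_none n 1 (by decide) h1']
      by_cases h2 : pvHit n 2 = true
      · obtain ⟨mp, hmp, hv⟩ := pv_G_some n 2 (by decide) h2
        rw [show pvG2 = pvG 2 from rfl, hmp]
        simp only [Option.some_or, Option.none_or]
        rw [hv]
        simp [pvChk, hr5, h0', h1', h2]
      · have h2' : pvHit n 2 = false := by simpa using h2
        rw [show pvG2 = pvG 2 from rfl, pv_G_none n 2 (by decide) h2']
        by_cases h3 : pvHit n 3 = true
        · obtain ⟨mp, hmp, hv⟩ := pv_G_some n 3 (by decide) h3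
          rw [show pvG3 = pvG 3 from rfl, hmp]
          simp only [Option.some_or, Option.none_or]
          rw [hv]
          simp [pvChk, hr5, h0', h1', h2', h3]
        · have h3' : pvHit n 3 = false := by simpa using h3
          rw [show pvG3 = pvG 3 from rfl, pv_G_none n 3 (by decide) h3']
          by_cases h4 : pvHit n 4 = true
          · obtain ⟨mp, hmp, hv⟩ := pv_G_some n 4 (by decide) h4
            rw [show pvG4 = pvG 4 from rfl, hmp]
            simp only [Option.some_or, Option.none_or]
            rw [hv]
            simp [pvChk, hr5, h0', h1', h2', h3', h4]
          · have h4' : pvHit n 4 = false := by simpa using h4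
            rw [show pvG4 = pvG 4 from rfl, pv_G_none n 4 (by decide) h4']
            simp [pvChk, hr5, h0', h1', h2', h3', h4']

-- ---- negative inputs: both return -1 ----
theorem pv_bxor_neg {c b : Int} (hc : c < 0) (hb : 0 ≤ b) : PySem.Int.bxor c b < 0 := by
  rw [PySem.Int.bxor.eq_1, if_neg (by omega), if_pos hb]
  omega

theorem pv_A_neg (coins : Int) (h : coins < 0) : solution coins = -1 := by
  unfold solution
  have hnone : (List.range 5).find? (fun cnt =>
      (pvCombos cnt pvChange).any (fun values =>
        let copy := pvApply coins values
        copy == 0 || copy == 511)) = none := by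
    rw [List.find?_eq_none]
    intro cnt _ hany
    simp only [List.any_eq_true] at hany
    obtain ⟨values, _, hcheck⟩ := hany
    have hneg : pvApply coins values < 0 := by
      unfold pvApply
      refine pv_foldl_inv (fun c => c < 0) _ values coins h ?_
      intro c value hc _
      refine pv_foldl_inv (fun c => c < 0) _ value c hc ?_
      intro c idx hc _
      exact pv_bxor_neg hc (Int.natCast_nonneg _)
    simp only [Bool.or_eq_true, beq_iff_eq] at hcheck
    omega
  rw [hnone]

set_option maxRecDepth 40000 in
theorem pv_table_nonneg : ∀ mp ∈ pvTableLit, 0 ≤ mp.1 := by decide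

theorem pv_B_neg (coins : Int) (h : coins < 0) : solution_alt coins = -1 := by
  rw [pv_solution_alt_eq, pv_table_lit]
  have hnone : pvTableLit.find? (pvCond coins) = none := by
    rw [List.find?_eq_none]
    intro mp hmp
    have hneg : PySem.Int.bxor coins mp.1 < 0 := pv_bxor_neg h (pv_table_nonneg mp hmp)
    unfold pvCond
    simp only [Bool.and_eq_true, Bool.or_eq_true, beq_iff_eq, not_and, not_or]
    intro _
    constructor <;> omega
  rw [hnone]

-- ===== VERDICT (by name: the statement is the Claim_ definition above) =====
theorem solution_spec : Claim_equal_solution := by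
  intro coins _
  unfold Spec_solution
  rcases lt_or_ge coins 0 with hneg | hpos
  · rw [pv_A_neg coins hneg, pv_B_neg coins hneg]
  · have hc : coins = ((coins.toNat : Nat) : Int) := (Int.toNat_of_nonneg hpos).symm
    rw [hc, pv_A_bridge, pv_B_bridge]
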